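-- pv_equiv track=rewrite | github.com/chimy2/CodingTest | Practice/src/introduction_coding_tests/SpecialSorting.py | solution
-- ===== SOURCE A (Python) =====
-- def solution(numlist, n):
--     arr = [0] * len(numlist)
--     numlist.sort()
--     l = -1
--     r = 0
--     for i, v in enumerate(numlist):
--         l = i - 1
--         r = i
--         if v > n:
--             break
--     for i in range(len(arr)):
--         if l < 0 or r < len(arr) and 2 * n >= numlist[l] + numlist[r]:
--             arr[i] = numlist[r]
--             r += 1
--         else:
--             arr[i] = numlist[l]
--             l -= 1
--     return arr
-- ===== SOURCE B (Python) =====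
-- def solution(numlist, n):
--     numlist.sort()  # keep A's in-place mutation of the argument
--     return sorted(numlist, key=lambda x: (abs(x - n), -x))
-- ===== Notes on version B (the rewrite author's own statement) =====
-- stated objective: simpler
-- what changed: Replaces A's split-point search plus outward two-pointer merge with a single sort keyed by (abs(x-n), -x), which yields the same closeness order and the same larger-element-first tie-break; numlist.sort() is kept so the caller-visible mutation matches A.
import Mathlib
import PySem

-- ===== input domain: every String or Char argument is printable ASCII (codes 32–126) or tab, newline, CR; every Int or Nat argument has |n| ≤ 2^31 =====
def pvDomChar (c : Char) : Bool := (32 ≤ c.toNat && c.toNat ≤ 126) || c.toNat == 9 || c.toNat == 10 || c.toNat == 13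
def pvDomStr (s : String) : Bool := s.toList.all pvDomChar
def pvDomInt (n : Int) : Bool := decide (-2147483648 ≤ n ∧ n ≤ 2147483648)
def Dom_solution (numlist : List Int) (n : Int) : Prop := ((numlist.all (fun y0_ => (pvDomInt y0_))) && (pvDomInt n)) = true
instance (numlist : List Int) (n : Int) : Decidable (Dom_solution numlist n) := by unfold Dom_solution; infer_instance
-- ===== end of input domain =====

-- B replaces A's split-point search + outward two-pointer merge with one sort keyed by
-- (abs(x-n), -x); both Pythons sort numlist in place (the caller-visible mutation is
-- identical), and the equivalence proved here is about the return value.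

-- ===== PORT A =====
-- numlist[i]: every index A actually evaluates is in range (shown in the proofs below),
-- so the default 0 of pyGetD is never produced.
def pvIdx (s : List Int) (i : Int) : Int := PySem.List.pyGetD s i 0

-- 'for i, v in enumerate(numlist): l = i - 1; r = i; if v > n: break'
def pvLoop1 (n : Int) : List (Int × Int) → Int → Int → Int × Int
  | [], l, r => (l, r)
  | (i, v) :: rest, _, _ =>
    if n < v then (i - 1, i) else pvLoop1 n rest (i - 1) i

-- 'for i in range(len(arr)): if l < 0 or r < len(arr) and 2*n >= numlist[l]+numlist[r]: …'
def pvMergeA (s : List Int) (n : Int) : Nat → Int → Int → List Int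
  | 0, _, _ => []
  | fuel+1, l, r =>
    if l < 0 ∨ (r < (s.length : Int) ∧ 2 * n ≥ pvIdx s l + pvIdx s r) then
      pvIdx s r :: pvMergeA s n fuel l (r + 1)
    else
      pvIdx s l :: pvMergeA s n fuel (l - 1) r

def solution (numlist : List Int) (n : Int) : List Int :=
  let s := PySem.List.sorted numlist (fun x => x)
  let lr := pvLoop1 n (PySem.List.enumerate s) (-1) 0
  pvMergeA s n numlist.length lr.1 lr.2

-- ===== PORT B =====
def solution_alt (numlist : List Int) (n : Int) : List Int :=
  let s := PySem.List.sorted numlist (fun x => x)   -- numlist.sort()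
  PySem.List.sorted2 s (fun x => |x - n|) (fun x => -x)

-- ===== PRECONDITION & SPEC =====
def Spec_solution (numlist : List Int) (n : Int) (out : List Int) : Prop := out = solution_alt numlist n
instance (numlist : List Int) (n : Int) (out : List Int) : Decidable (Spec_solution numlist n out) := by unfold Spec_solution; infer_instance

-- ===== CLAIM (what is proved, stated in full; the proofs are below) =====
def Claim_equal_solution : Prop := ∀ (numlist : List Int) (n : Int), Dom_solution numlist n → Spec_solution numlist n (solution numlist n)

-- ===== LEMMAS AND PROOFS =====

-- Single integer key realising the lexicographic order of (|x - n|, -x).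
def pvKey (n x : Int) : Int := 2 * |x - n| - (if n < x then 1 else 0)

-- Proof-side list form of A's merge loop.
def pvMergeL (n : Int) : List Int → List Int → List Int
  | [], R => R
  | a :: L', [] => a :: pvMergeL n L' []
  | a :: L', b :: R' =>
    if 2 * n ≥ a + b then b :: pvMergeL n (a :: L') R' else a :: pvMergeL n L' (b :: R')
termination_by L R => L.length + R.length

theorem pvKey_eq (n x : Int) : pvKey n x = if n < x then 2 * (x - n) - 1 else 2 * (n - x) := by
  unfold pvKey
  rcases abs_cases (x - n) with ⟨h1, h2⟩ | ⟨h1, h2⟩ <;> split_ifs <;> omega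

theorem pvKey_inj (n : Int) : Function.Injective (pvKey n) := by
  intro a b h
  rw [pvKey_eq, pvKey_eq] at h
  split_ifs at h <;> omega

-- the lexicographic (|x-n|, -x) comparison is exactly pvKey comparison
theorem pvLex_eq_key (n a b : Int) :
    (decide (|a - n| < |b - n|) || (!decide (|b - n| < |a - n|) && decide (-a < -b)))
      = decide (pvKey n a < pvKey n b) := by
  rw [pvKey_eq, pvKey_eq]
  rcases abs_cases (a - n) with ⟨h1, h2⟩ | ⟨h1, h2⟩ <;>
    rcases abs_cases (b - n) with ⟨h3, h4⟩ | ⟨h3, h4⟩ <;>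
      rw [h1, h3] <;> split_ifs <;>
        (simp only [← decide_not, ← Bool.decide_and, ← Bool.decide_or, decide_eq_decide]; omega)

theorem sorted2_eq_sorted_key (xs : List Int) (n : Int) :
    PySem.List.sorted2 xs (fun x => |x - n|) (fun x => -x) = PySem.List.sorted xs (pvKey n) := by
  rw [PySem.List.sorted_eq_foldl_insertBy]
  show List.foldl (fun acc x => PySem.List.insertBy
      (fun a b => decide (|a - n| < |b - n|) || (!decide (|b - n| < |a - n|) && decide (-a < -b)))
      x acc) [] xs = _
  congr 1
  funext acc x
  congr 1
  funext a b
  exact pvLex_eq_key n a b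

-- arithmetic facts about pvKey
theorem pvKey_left_mono (n a x : Int) (hx : x ≤ a) (ha : a ≤ n) : pvKey n a ≤ pvKey n x := by
  rw [pvKey_eq, pvKey_eq]; split_ifs <;> omega

theorem pvKey_right_le (n a b : Int) (ha : a ≤ n) (hab : a ≤ b) (h : 2 * n ≥ a + b) :
    pvKey n b ≤ pvKey n a := by
  rw [pvKey_eq, pvKey_eq]; split_ifs <;> omega

theorem pvKey_left_le (n a b : Int) (ha : a ≤ n) (h : ¬ 2 * n ≥ a + b) :
    pvKey n a ≤ pvKey n b := by
  rw [pvKey_eq, pvKey_eq]; split_ifs <;> omega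

theorem pvKey_gt_mono (n x y : Int) (hx : n < x) (hxy : x ≤ y) : pvKey n x ≤ pvKey n y := by
  rw [pvKey_eq, pvKey_eq]; split_ifs <;> omega

theorem pvMergeL_perm (n : Int) : ∀ (L R : List Int), (pvMergeL n L R).Perm (L ++ R) := by
  intro L R
  fun_induction pvMergeL n L R with
  | case1 R => simp
  | case2 a L' ih => simpa using ih
  | case3 a L' b R' h ih =>
      refine List.Perm.trans (List.Perm.cons b ih) ?_
      exact (List.perm_middle).symm.trans (by simp)
  | case4 a L' b R' h ih =>
      exact List.Perm.cons a ih

theorem pvMergeL_pairwise (n : Int) :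
    ∀ (L R : List Int),
      L.Pairwise (fun x y => y ≤ x) →
      (∀ x ∈ L, x ≤ n) →
      R.Pairwise (fun x y => pvKey n x ≤ pvKey n y) →
      (∀ x ∈ L, ∀ y ∈ R, x ≤ y) →
      (pvMergeL n L R).Pairwise (fun x y => pvKey n x ≤ pvKey n y) := by
  intro L R
  fun_induction pvMergeL n L R with
  | case1 R => intro _ _ hRk _; exact hRk
  | case2 a L' ih =>
      intro hLd hLn hRk hcross
      refine List.Pairwise.cons ?_ (ih hLd.of_cons (fun x hx => hLn x (List.mem_cons_of_mem a hx)) hRk (by simp))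
      intro z hz
      have hzm : z ∈ L' ++ ([] : List Int) := (pvMergeL_perm n L' []).mem_iff.mp hz
      simp only [List.append_nil] at hzm
      exact pvKey_left_mono n a z (List.rel_of_pairwise_cons hLd hzm) (hLn a List.mem_cons_self)
  | case3 a L' b R' h ih =>
      intro hLd hLn hRk hcross
      have ha : a ≤ n := hLn a List.mem_cons_self
      have hab : a ≤ b := hcross a List.mem_cons_self b List.mem_cons_self
      refine List.Pairwise.cons ?_ (ih hLd hLn hRk.of_cons
        (fun x hx y hy => hcross x hx y (List.mem_cons_of_mem b hy)))
      intro z hz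
      have hzm := (pvMergeL_perm n (a :: L') R').mem_iff.mp hz
      rcases List.mem_append.mp hzm with hzL | hzR
      · rcases List.mem_cons.mp hzL with heq | hzL'
        · rw [heq]; exact pvKey_right_le n a b ha hab h
        · exact le_trans (pvKey_right_le n a b ha hab h)
            (pvKey_left_mono n a z (List.rel_of_pairwise_cons hLd hzL') ha)
      · exact List.rel_of_pairwise_cons hRk hzR
  | case4 a L' b R' h ih =>
      intro hLd hLn hRk hcross
      have ha : a ≤ n := hLn a List.mem_cons_self
      refine List.Pairwise.cons ?_ (ih hLd.of_cons
        (fun x hx => hLn x (List.mem_cons_of_mem a hx)) hRk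
        (fun x hx y hy => hcross x (List.mem_cons_of_mem a hx) y hy))
      intro z hz
      have hzm := (pvMergeL_perm n L' (b :: R')).mem_iff.mp hz
      rcases List.mem_append.mp hzm with hzL | hzR
      · exact pvKey_left_mono n a z (List.rel_of_pairwise_cons hLd hzL) ha
      · rcases List.mem_cons.mp hzR with heq | hzR'
        · rw [heq]; exact pvKey_left_le n a b ha h
        · exact le_trans (pvKey_left_le n a b ha h) (List.rel_of_pairwise_cons hRk hzR')

theorem pv_mem_take_findIdx (p : Int → Bool) :
    ∀ (xs : List Int) (x : Int), x ∈ xs.take (xs.findIdx p) → p x = false := by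
  intro xs
  induction xs with
  | nil => intro x hx; simp at hx
  | cons a t ih =>
      intro x hx
      by_cases hpa : p a
      · rw [List.findIdx_cons, hpa] at hx; simp at hx
      · rw [List.findIdx_cons, Bool.cond_eq_ite, if_neg (by simp [hpa])] at hx
        rw [List.take_succ_cons] at hx
        rcases List.mem_cons.mp hx with heq | hx'
        · rw [heq]; exact Bool.eq_false_iff.mpr hpa
        · exact ih x hx'

theorem pvLoop1_spec (n : Int) :
    ∀ (xs : List Int) (s l0 r0 : Int),
      pvLoop1 n (PySem.List.enumerate xs s) l0 r0 =
        if xs = [] then (l0, r0)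
        else (s + (min (xs.findIdx (fun v => decide (n < v))) (xs.length - 1) : Nat) - 1,
              s + (min (xs.findIdx (fun v => decide (n < v))) (xs.length - 1) : Nat)) := by
  intro xs
  induction xs with
  | nil => intro s l0 r0; simp [PySem.List.enumerate_nil, pvLoop1]
  | cons v t ih =>
      intro s l0 r0
      rw [PySem.List.enumerate_cons]
      rw [if_neg (by simp)]
      by_cases hv : n < v
      · simp only [pvLoop1, if_pos hv, List.findIdx_cons, decide_eq_true_eq]
        rw [Bool.cond_eq_ite, if_pos (by simp [hv])]
        simp
      · simp only [pvLoop1, if_neg hv, List.findIdx_cons]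
        rw [Bool.cond_eq_ite, if_neg (by simp [hv])]
        rw [ih (s+1) (s-1) s]
        by_cases ht : t = []
        · subst ht; simp
        · rw [if_neg ht]
          have hlen : 1 ≤ t.length := by
            cases t with
            | nil => exact absurd rfl ht
            | cons _ _ => simp
          have hm : min (t.findIdx (fun v => decide (n < v)) + 1) ((t.length + 1) - 1)
              = 1 + min (t.findIdx (fun v => decide (n < v))) (t.length - 1) := by omega
          simp only [List.length_cons, hm]
          push_cast
          simp only [Prod.mk.injEq]
          constructor <;> ring

theorem pvMergeL_nil (n : Int) (R : List Int) : pvMergeL n [] R = R := by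
  rw [pvMergeL.eq_def]

theorem pvMergeL_consnil (n a : Int) (L' : List Int) :
    pvMergeL n (a :: L') [] = a :: pvMergeL n L' [] := by
  rw [pvMergeL.eq_def]

theorem pvMergeL_conscons (n a b : Int) (L' R' : List Int) :
    pvMergeL n (a :: L') (b :: R') =
      if 2 * n ≥ a + b then b :: pvMergeL n (a :: L') R' else a :: pvMergeL n L' (b :: R') := by
  rw [pvMergeL.eq_def]

theorem pvIdx_eq (s : List Int) (i : Int) (h0 : 0 ≤ i) (h1 : i < s.length) :
    pvIdx s i = s[i.toNat]'(by omega) := by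
  unfold pvIdx
  rw [PySem.List.pyGetD_eq_getElem s 0 h0 h1]

theorem pv_take_succ_rev (s : List Int) (k : Nat) (h : k < s.length) :
    (s.take (k+1)).reverse = s[k] :: (s.take k).reverse := by
  rw [List.take_succ, List.getElem?_eq_getElem h]
  simp

theorem pv_pairwise_of_length_le_one {α : Type} {R : α → α → Prop} (l : List α)
    (h : l.length ≤ 1) : l.Pairwise R := by
  match l with
  | [] => exact List.Pairwise.nil
  | [a] => exact List.pairwise_singleton R a
  | a :: b :: t => simp at h

theorem pvMergeA_eq (s : List Int) (n : Int) :
    ∀ (fuel : Nat) (l r : Int), -1 ≤ l → l < r → r ≤ (s.length : Int) →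
      (fuel : Int) = (l + 1) + ((s.length : Int) - r) →
      pvMergeA s n fuel l r = pvMergeL n ((s.take (l+1).toNat).reverse) (s.drop r.toNat) := by
  intro fuel
  induction fuel with
  | zero =>
      intro l r h1 h2 h3 h4
      have hl : l = -1 := by omega
      have hrn : r.toNat = s.length := by omega
      subst hl
      rw [show ((-1 : Int) + 1).toNat = 0 from rfl]
      simp [pvMergeA, pvMergeL_nil, hrn]
  | succ f ih =>
      intro l r h1 h2 h3 h4
      by_cases hl : l < 0
      · have hl' : l = -1 := by omega
        have hr : r < (s.length : Int) := by omega
        have hrt : r.toNat < s.length := by omega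
        subst hl'
        rw [show ((-1 : Int) + 1).toNat = 0 from rfl]
        simp only [List.take_zero, List.reverse_nil, pvMergeL_nil]
        simp only [pvMergeA, if_pos (Or.inl (by omega : (-1 : Int) < 0))]
        rw [ih (-1) (r+1) (by omega) (by omega) (by omega) (by omega)]
        rw [show ((-1 : Int) + 1).toNat = 0 from rfl]
        simp only [List.take_zero, List.reverse_nil, pvMergeL_nil]
        rw [List.drop_eq_getElem_cons hrt]
        rw [pvIdx_eq s r (by omega) hr]
        congr 1
        congr 1
        omega
      · have h0l : 0 ≤ l := by omega
        have hlt : l < (s.length : Int) := by omega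
        have hltn : l.toNat < s.length := by omega
        have htk : (l+1).toNat = l.toNat + 1 := by omega
        rw [htk, pv_take_succ_rev s l.toNat hltn]
        by_cases hr : r < (s.length : Int)
        · have hrt : r.toNat < s.length := by omega
          rw [List.drop_eq_getElem_cons hrt, pvMergeL_conscons]
          simp only [pvMergeA]
          rw [pvIdx_eq s l h0l hlt, pvIdx_eq s r (by omega) hr]
          by_cases hc : 2 * n ≥ s[l.toNat] + s[r.toNat]
          · rw [if_pos (Or.inr ⟨hr, hc⟩), if_pos hc]
            rw [ih l (r+1) (by omega) (by omega) (by omega) (by omega)]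
            rw [htk, pv_take_succ_rev s l.toNat hltn]
            rw [show (r+1).toNat = r.toNat + 1 from by omega]
          · rw [if_neg (by push_neg; exact ⟨by omega, fun _ => by omega⟩), if_neg hc]
            rw [ih (l-1) r (by omega) (by omega) (by omega) (by omega)]
            rw [show (l-1+1).toNat = l.toNat from by omega]
            rw [List.drop_eq_getElem_cons hrt]
        · have hrt : r.toNat = s.length := by omega
          rw [hrt, List.drop_length, pvMergeL_consnil]
          simp only [pvMergeA]
          rw [if_neg (by push_neg; exact ⟨by omega, fun h => absurd h hr⟩)]
          rw [pvIdx_eq s l h0l hlt]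
          rw [ih (l-1) r (by omega) (by omega) (by omega) (by omega)]
          rw [show (l-1+1).toNat = l.toNat from by omega, hrt, List.drop_length]

-- ===== VERDICT (by name: the statement is the Claim_ definition above) =====
theorem solution_spec : Claim_equal_solution := by
  unfold Claim_equal_solution
  intro numlist n _
  unfold Spec_solution solution solution_alt
  dsimp only
  rw [sorted2_eq_sorted_key]
  set s := PySem.List.sorted numlist (fun x => x) with hs
  have hsp : s.Perm numlist := PySem.List.sorted_perm numlist (fun x => x) false
  have hsorted : s.Pairwise (fun a b : Int => a ≤ b) := by
    simpa using PySem.List.sorted_pairwise numlist (fun x => x)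
  set p : Int → Bool := fun v => decide (n < v) with hp
  set j : Nat := min (s.findIdx p) (s.length - 1) with hj
  have hloop : pvLoop1 n (PySem.List.enumerate s) (-1) 0 = ((j : Int) - 1, (j : Int)) := by
    rw [pvLoop1_spec]
    by_cases hse : s = []
    · rw [if_pos hse]
      have : j = 0 := by simp [hj, hse]
      simp [this]
    · rw [if_neg hse]
      simp [hj, hp]
  rw [hloop]
  have hjlen : j ≤ s.length := by
    have := Nat.min_le_right (s.findIdx p) (s.length - 1)
    omega
  have hlen : numlist.length = s.length := (PySem.List.length_sorted numlist (fun x => x) false).symm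
  rw [hlen]
  rw [pvMergeA_eq s n s.length ((j : Int) - 1) (j : Int) (by omega) (by omega)
    (by exact_mod_cast Nat.cast_le.mpr hjlen) (by omega)]
  rw [show ((j : Int) - 1 + 1).toNat = j from by omega, Int.toNat_natCast]
  -- properties of the left and right segments
  have hLn : ∀ x ∈ (s.take j).reverse, x ≤ n := by
    intro x hx
    rw [List.mem_reverse] at hx
    have hxf : x ∈ s.take (s.findIdx p) := by
      have : s.take j = (s.take (s.findIdx p)).take j := by
        rw [List.take_take]
        congr 1
        omega
      rw [this] at hx
      exact List.mem_of_mem_take hx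
    have := pv_mem_take_findIdx p s x hxf
    simp only [hp, decide_eq_false_iff_not, not_lt] at this
    exact this
  have hRgt : ∀ x ∈ s.drop j, s.findIdx p < s.length → n < x := by
    intro x hx hflt
    have hjf : j = s.findIdx p := by omega
    rw [hjf] at hx
    have hhead : p (s[s.findIdx p]'hflt) = true := List.findIdx_getElem (w := hflt)
    have hnlt : n < s[s.findIdx p]'hflt := by simpa [hp] using hhead
    rw [List.drop_eq_getElem_cons hflt] at hx
    rcases List.mem_cons.mp hx with heq | hx'
    · rw [heq]; exact hnlt
    · have hdp : (s.drop (s.findIdx p)).Pairwise (fun a b : Int => a ≤ b) :=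
        List.Pairwise.sublist (List.drop_sublist _ _) hsorted
      rw [List.drop_eq_getElem_cons hflt] at hdp
      exact lt_of_lt_of_le hnlt (List.rel_of_pairwise_cons hdp hx')
  have hRk : (s.drop j).Pairwise (fun x y => pvKey n x ≤ pvKey n y) := by
    by_cases hf : s.findIdx p < s.length
    · refine (List.Pairwise.sublist (List.drop_sublist _ _) hsorted).imp_of_mem ?_
      intro a b ha hb hab
      exact pvKey_gt_mono n a b (hRgt a ha hf) hab
    · have : j = s.length - 1 := by
        have := List.findIdx_le_length (p := p) (xs := s)
        omega
      apply pv_pairwise_of_length_le_one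
      rw [List.length_drop]
      omega
  have hLd : (s.take j).reverse.Pairwise (fun x y : Int => y ≤ x) :=
    List.pairwise_reverse.mpr (List.Pairwise.sublist (List.take_sublist _ _) hsorted)
  have hcross : ∀ x ∈ (s.take j).reverse, ∀ y ∈ s.drop j, x ≤ y := by
    intro x hx y hy
    rw [List.mem_reverse] at hx
    have hps : List.Pairwise (fun a b : Int => a ≤ b) (s.take j ++ s.drop j) := by
      rw [List.take_append_drop]; exact hsorted
    exact (List.pairwise_append.mp hps).2.2 x hx y hy
  -- A's output: a permutation of numlist, pairwise-sorted by pvKey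
  have hApw : (pvMergeL n ((s.take j).reverse) (s.drop j)).Pairwise
      (fun x y => pvKey n x ≤ pvKey n y) :=
    pvMergeL_pairwise n _ _ hLd (fun x hx => hLn x hx) hRk hcross
  have hAperm : (pvMergeL n ((s.take j).reverse) (s.drop j)).Perm numlist := by
    refine ((pvMergeL_perm n _ _).trans ?_).trans hsp
    have h1 : ((s.take j).reverse ++ s.drop j).Perm (s.take j ++ s.drop j) :=
      (List.reverse_perm _).append_right _
    exact h1.trans (by rw [List.take_append_drop])
  -- B's output: a permutation of numlist, pairwise-sorted by pvKey
  have hBpw : (PySem.List.sorted s (pvKey n)).Pairwise (fun x y => pvKey n x ≤ pvKey n y) :=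
    PySem.List.sorted_pairwise s (pvKey n)
  have hBperm : (PySem.List.sorted s (pvKey n)).Perm numlist :=
    (PySem.List.sorted_perm s (pvKey n) false).trans hsp
  exact PySem.List.eq_of_perm_of_pairwise_le_of_injective (pvKey n) (pvKey_inj n)
    (hAperm.trans hBperm.symm) hApw hBpw
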